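-- pv_equiv track=rewrite | github.com/ZPESystems/Ansible | collections/ansible_collections/zpe/nodegrid/plugins/modules/services.py | clean_rule
-- ===== SOURCE A (Python) =====
-- def clean_rule(rule: dict) -> dict:
--     status_page = {'key': 'enable_services_status_page','list':['enable_reboot_on_services_status_page']}
--     search_engine = {'key': 'enable_search_engine', 'list': ['enable_dashboards']}
--     bluetooth = {'key': 'enable_bluetooth', 'list': ['bluetooth_display_name','bluetooth_discoverable_mode']}
--     docker = {'key': 'enable_docker', 'list':[]}
--     qemu = {'key': 'enable_qemu|kvm', 'list':[]}
--     autodiscovery = {'key': 'enable_autodiscovery', 'list':['dhcp_lease_per_autodiscovery_rules']}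
--     vm_serial_access = {'key': 'enable_vm_serial_access', 'list': ['vm_serial_port','vmotion_timeout']}
--     multiple_authentication_fails = {'key': 'block_host_with_multiple_authentication_fails', 'list': ['period_host_will_stay_blocked','timeframe_to_monitor_authentication_fails','number_of_authentication_fails_to_block_host']}
--     zpe_cloud = {'key': 'enable_zpe_cloud', 'list':['enable_remote_access', 'enable_file_protection', 'enable_file_encryption']}
--     master_list = [autodiscovery,vm_serial_access,status_page,docker,qemu,multiple_authentication_fails,search_engine,bluetooth,zpe_cloud]
--
--     for item in master_list:
--         if item['key'] in rule.keys():
--                 if rule[item['key']] == "no":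
--                     for remove_key in item['list']:
--                         if remove_key in rule.keys():
--                             rule.pop(remove_key)
--
--     return rule
-- ===== SOURCE B (Python) =====
-- # Reverse index: dependent key -> its controlling toggle.  B scans the RULE's own
-- # keys once, keeping a key unless its parent toggle is set to 'no' in the rule,
-- # instead of scanning the toggle table and popping per toggle as A does.
-- PARENT = {
--     'enable_reboot_on_services_status_page': 'enable_services_status_page',
--     'enable_dashboards': 'enable_search_engine',
--     'bluetooth_display_name': 'enable_bluetooth',
--     'bluetooth_discoverable_mode': 'enable_bluetooth',
--     'dhcp_lease_per_autodiscovery_rules': 'enable_autodiscovery',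
--     'vm_serial_port': 'enable_vm_serial_access',
--     'vmotion_timeout': 'enable_vm_serial_access',
--     'period_host_will_stay_blocked': 'block_host_with_multiple_authentication_fails',
--     'timeframe_to_monitor_authentication_fails': 'block_host_with_multiple_authentication_fails',
--     'number_of_authentication_fails_to_block_host': 'block_host_with_multiple_authentication_fails',
--     'enable_remote_access': 'enable_zpe_cloud',
--     'enable_file_protection': 'enable_zpe_cloud',
--     'enable_file_encryption': 'enable_zpe_cloud',
-- }
--
-- def clean_rule(rule: dict) -> dict:
--     # correctness: toggle keys never appear as dependents, so deletions cannot
--     # change any toggle's value, and each dependent has exactly one toggle.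
--     doomed = [k for k in rule if k in PARENT and rule.get(PARENT[k]) == 'no']
--     for k in doomed:
--         del rule[k]
--     return rule
-- ===== Notes on version B (the rewrite author's own statement) =====
-- stated objective: alternative
-- what changed: B inverts the dependency table into a reverse index dependent->toggle and makes one pass over the RULE's own keys, deleting a key exactly when its parent toggle is 'no'; A instead iterates the toggle table and pops each toggle's dependents inline.
import Mathlib
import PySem

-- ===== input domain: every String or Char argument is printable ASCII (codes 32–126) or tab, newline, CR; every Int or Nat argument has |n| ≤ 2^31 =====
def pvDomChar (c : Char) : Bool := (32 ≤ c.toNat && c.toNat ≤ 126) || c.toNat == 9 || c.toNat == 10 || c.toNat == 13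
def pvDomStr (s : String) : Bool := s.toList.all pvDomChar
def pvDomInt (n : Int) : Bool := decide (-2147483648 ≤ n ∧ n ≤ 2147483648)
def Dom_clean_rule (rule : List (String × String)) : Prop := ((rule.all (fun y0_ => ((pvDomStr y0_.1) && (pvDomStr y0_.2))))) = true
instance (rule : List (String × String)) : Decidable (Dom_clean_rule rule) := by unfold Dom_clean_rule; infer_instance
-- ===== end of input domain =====

-- B inverts A's toggle table into a reverse index dependent→toggle and scans the rule's own
-- keys once, deleting a key exactly when its parent toggle is 'no' (objective: alternative
-- algorithm, same behaviour). Both A and B mutate the argument dict in place (same deletions)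
-- and return it; the theorems are about the return value.

-- shared helper: Python's dict lookup d.get(k) on the association list (first match)
def pvGet? (r : List (String × String)) (k : String) : Option String :=
  (r.find? (fun p => p.1 == k)).map (·.2)

-- ===== PORT A =====
-- the nine {'key': …, 'list': […]} dicts, in master_list order
def pvMaster : List (String × List String) :=
  [("enable_autodiscovery", ["dhcp_lease_per_autodiscovery_rules"]),
   ("enable_vm_serial_access", ["vm_serial_port", "vmotion_timeout"]),
   ("enable_services_status_page", ["enable_reboot_on_services_status_page"]),
   ("enable_docker", []),
   ("enable_qemu|kvm", []),
   ("block_host_with_multiple_authentication_fails",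
     ["period_host_will_stay_blocked", "timeframe_to_monitor_authentication_fails",
      "number_of_authentication_fails_to_block_host"]),
   ("enable_search_engine", ["enable_dashboards"]),
   ("enable_bluetooth", ["bluetooth_display_name", "bluetooth_discoverable_mode"]),
   ("enable_zpe_cloud", ["enable_remote_access", "enable_file_protection", "enable_file_encryption"])]

-- 'for remove_key in item["list"]: if remove_key in rule.keys(): rule.pop(remove_key)'
def pvAInner (r : List (String × String)) (ks : List String) : List (String × String) :=
  ks.foldl (fun r k => if r.any (fun p => p.1 == k) then r.filter (fun p => p.1 != k) else r) r

-- one iteration of 'for item in master_list'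
def pvAStep (r : List (String × String)) (it : String × List String) : List (String × String) :=
  if r.any (fun p => p.1 == it.1) then
    if (pvGet? r it.1).getD "" = "no" then pvAInner r it.2 else r
  else r

def clean_rule (rule : List (String × String)) : List (String × String) :=
  pvMaster.foldl pvAStep rule

-- ===== PORT B =====
-- Source B's PARENT reverse index, in its insertion order
def pvParent : List (String × String) :=
  [("enable_reboot_on_services_status_page", "enable_services_status_page"),
   ("enable_dashboards", "enable_search_engine"),
   ("bluetooth_display_name", "enable_bluetooth"),
   ("bluetooth_discoverable_mode", "enable_bluetooth"),
   ("dhcp_lease_per_autodiscovery_rules", "enable_autodiscovery"),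
   ("vm_serial_port", "enable_vm_serial_access"),
   ("vmotion_timeout", "enable_vm_serial_access"),
   ("period_host_will_stay_blocked", "block_host_with_multiple_authentication_fails"),
   ("timeframe_to_monitor_authentication_fails", "block_host_with_multiple_authentication_fails"),
   ("number_of_authentication_fails_to_block_host", "block_host_with_multiple_authentication_fails"),
   ("enable_remote_access", "enable_zpe_cloud"),
   ("enable_file_protection", "enable_zpe_cloud"),
   ("enable_file_encryption", "enable_zpe_cloud")]

-- 'doomed = [k for k in rule if k in PARENT and rule.get(PARENT[k]) == "no"]'
def pvDoomed (rule : List (String × String)) : List String :=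
  (rule.map (·.1)).filter (fun k =>
    match pvGet? pvParent k with
    | some t => pvGet? rule t == some "no"
    | none => false)

-- 'for k in doomed: del rule[k]'
def clean_rule_alt (rule : List (String × String)) : List (String × String) :=
  (pvDoomed rule).foldl (fun r k => r.filter (fun p => p.1 != k)) rule

-- ===== PRECONDITION & SPEC =====
def Spec_clean_rule (rule : List (String × String)) (out : List (String × String)) : Prop := out = clean_rule_alt rule
instance (rule : List (String × String)) (out : List (String × String)) : Decidable (Spec_clean_rule rule out) := by unfold Spec_clean_rule; infer_instance

-- ===== CLAIM (what is proved, stated in full; the proofs are below) =====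
def Claim_equal_clean_rule : Prop := ∀ (rule : List (String × String)), Dom_clean_rule rule → Spec_clean_rule rule (clean_rule rule)

-- ===== LEMMAS AND PROOFS =====

-- the keys scheduled for removal by A, as one list (proof-only helper)
def remKeys (c : String × List String → Bool) : List (String × List String) → List String
  | [] => []
  | it :: rest => (if c it then it.2 else []) ++ remKeys c rest

theorem remKeys_congr {c c' : String × List String → Bool} :
    ∀ {l : List (String × List String)}, (∀ it ∈ l, c it = c' it) → remKeys c l = remKeys c' l := by
  intro l
  induction l with
  | nil => intro _; rfl
  | cons it rest ih =>
    intro h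
    simp only [remKeys, h it (by simp), ih (fun x hx => h x (by simp [hx]))]

theorem mem_remKeys {c : String × List String → Bool} {x : String} :
    ∀ {l : List (String × List String)}, x ∈ remKeys c l ↔ ∃ it ∈ l, c it = true ∧ x ∈ it.2 := by
  intro l
  induction l with
  | nil => simp [remKeys]
  | cons it rest ih =>
    by_cases h : c it = true
    · simp [remKeys, h, ih]
    · simp [remKeys, h, ih]

-- popping each key of ks in turn is one filter
theorem foldl_pop_eq_filter :
    ∀ (ks : List String) (r : List (String × String)),
      ks.foldl (fun r k => r.filter (fun p => p.1 != k)) r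
        = r.filter (fun p => !ks.contains p.1) := by
  intro ks
  induction ks with
  | nil => intro r; simp
  | cons k ks ih =>
    intro r
    simp only [List.foldl_cons, ih, List.filter_filter]
    apply List.filter_congr
    intro p _
    by_cases h : p.1 = k <;> simp [h, bne]

-- A's guarded inner loop is the same filter
theorem aInner_eq_filter :
    ∀ (ks : List String) (r : List (String × String)),
      pvAInner r ks = r.filter (fun p => !ks.contains p.1) := by
  intro ks
  induction ks with
  | nil => intro r; simp [pvAInner]
  | cons k ks ih =>
    intro r
    by_cases h : r.any (fun p => p.1 == k) = true
    · simp only [pvAInner, List.foldl_cons, h, if_true]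
      have := ih (r.filter (fun p => p.1 != k))
      simp only [pvAInner] at this
      rw [this, List.filter_filter]
      apply List.filter_congr
      intro p _
      by_cases hp : p.1 = k <;> simp [hp, bne]
    · have h' : r.any (fun p => p.1 == k) = false := by
        cases hh : r.any (fun p => p.1 == k) <;> simp_all
      simp only [pvAInner, List.foldl_cons, h', Bool.false_eq_true, if_false]
      have := ih r
      simp only [pvAInner] at this
      rw [this]
      apply List.filter_congr
      intro p hp
      have hk : ¬ p.1 = k := by
        intro hk
        have := List.any_eq_false.mp h' p hp
        simp [hk] at this
      simp [hk]

-- a lookup survives filtering out other keys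
theorem get?_filter (ks : List String) (k : String) (h : ks.contains k = false)
    (r : List (String × String)) :
    pvGet? (r.filter (fun p => !ks.contains p.1)) k = pvGet? r k := by
  unfold pvGet?
  rw [List.find?_filter]
  have heq : (fun (a : String × String) => decide ((!ks.contains a.1) = true ∧ (a.1 == k) = true))
      = (fun a => a.1 == k) := by
    funext a
    by_cases ha : a.1 = k
    · rw [ha]; simp [show k ∉ ks by simpa using h]
    · simp [ha]
  rw [heq]

-- one step of A, re-expressed through the canonical condition pvGet? r key = some "no"
theorem aStep_eq (r : List (String × String)) (it : String × List String) :
    pvAStep r it = if pvGet? r it.1 = some "no" then r.filter (fun p => !it.2.contains p.1) else r := by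
  unfold pvAStep
  cases hf : r.find? (fun p => p.1 == it.1) with
  | none =>
    have hany : r.any (fun p => p.1 == it.1) = false := by
      rw [List.any_eq_false]
      intro p hp
      simpa using List.find?_eq_none.mp hf p hp
    simp [hany, pvGet?, hf]
  | some v =>
    have hv := List.find?_some hf
    have hany : r.any (fun p => p.1 == it.1) = true :=
      List.any_eq_true.mpr ⟨v, List.mem_of_find?_eq_some hf, hv⟩
    have hg : pvGet? r it.1 = some v.2 := by simp [pvGet?, hf]
    by_cases hv2 : v.2 = "no" <;> simp [hany, hg, hv2, aInner_eq_filter]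

-- A's whole loop, provided no toggle key occurs in any dependents list
theorem foldl_aStep_eq :
    ∀ (items : List (String × List String)) (r : List (String × String)),
      (∀ it ∈ items, ∀ it' ∈ items, (it.2).contains it'.1 = false) →
      items.foldl pvAStep r
        = r.filter (fun p => !(remKeys (fun it => pvGet? r it.1 == some "no") items).contains p.1) := by
  intro items
  induction items with
  | nil => intro r _; simp [remKeys]
  | cons it rest ih =>
    intro r hd
    simp only [List.foldl_cons, aStep_eq]
    by_cases hc : pvGet? r it.1 = some "no"
    · simp only [hc, if_true]
      rw [ih (r.filter (fun p => !it.2.contains p.1))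
            (fun a ha b hb => hd a (by simp [ha]) b (by simp [hb]))]
      have hck : ∀ it' ∈ rest,
          (pvGet? (r.filter (fun p => !it.2.contains p.1)) it'.1 == some "no")
            = (pvGet? r it'.1 == some "no") := by
        intro it' h'
        rw [get?_filter it.2 it'.1 (hd it (by simp) it' (by simp [h']))]
      rw [remKeys_congr hck, List.filter_filter]
      apply List.filter_congr
      intro p _
      simp [remKeys, hc, Bool.and_comm]
    · rw [if_neg hc, ih r (fun a ha b hb => hd a (by simp [ha]) b (by simp [hb]))]
      apply List.filter_congr
      intro p _
      simp [remKeys, hc]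

-- each dependent key's reverse-index entry is its toggle (finite concrete fact)
theorem parent_of_dep :
    ∀ it ∈ pvMaster, ∀ k ∈ it.2, pvGet? pvParent k = some it.1 := by decide

-- each reverse-index entry comes from some toggle's dependents list (finite concrete fact)
theorem dep_of_parent :
    ∀ q ∈ pvParent, ∃ it ∈ pvMaster, it.1 = q.2 ∧ q.1 ∈ it.2 := by decide

-- B's doomed list holds exactly the keys of rule whose parent toggle is "no"
theorem mem_doomed (rule : List (String × String)) (x : String) :
    x ∈ pvDoomed rule ↔
      x ∈ rule.map (·.1) ∧ ∃ t, pvGet? pvParent x = some t ∧ pvGet? rule t = some "no" := by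
  unfold pvDoomed
  rw [List.mem_filter]
  constructor
  · rintro ⟨hx, hc⟩
    refine ⟨hx, ?_⟩
    cases hp : pvGet? pvParent x with
    | none => rw [hp] at hc; simp at hc
    | some t =>
      rw [hp] at hc
      exact ⟨t, rfl, by simpa using hc⟩
  · rintro ⟨hx, t, hp, hn⟩
    exact ⟨hx, by rw [hp]; simpa using hn⟩

-- ===== VERDICT (by name: the statement is the Claim_ definition above) =====
theorem clean_rule_spec : Claim_equal_clean_rule := by
  intro rule _
  unfold Spec_clean_rule clean_rule clean_rule_alt
  rw [foldl_aStep_eq pvMaster rule (by decide), foldl_pop_eq_filter]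
  apply List.filter_congr
  intro p hp
  have hmem : p.1 ∈ remKeys (fun it => pvGet? rule it.1 == some "no") pvMaster ↔
      p.1 ∈ pvDoomed rule := by
    rw [mem_remKeys, mem_doomed]
    constructor
    · rintro ⟨it, hm, hc, hx⟩
      exact ⟨List.mem_map_of_mem hp, it.1, parent_of_dep it hm p.1 hx, by simpa using hc⟩
    · rintro ⟨_, t, hpar, hno⟩
      have hq : ∃ q ∈ pvParent, (q.1 == p.1) = true ∧ q.2 = t := by
        unfold pvGet? at hpar
        cases hf : pvParent.find? (fun q => q.1 == p.1) with
        | none => rw [hf] at hpar; simp at hpar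
        | some q =>
          rw [hf] at hpar
          have hk := List.find?_some hf
          exact ⟨q, List.mem_of_find?_eq_some hf, hk, by simpa using hpar⟩
      obtain ⟨q, hqm, hqk, hqt⟩ := hq
      obtain ⟨it, him, hit1, hdep⟩ := dep_of_parent q hqm
      refine ⟨it, him, ?_, ?_⟩
      · rw [hit1, hqt]; simpa using hno
      · have : q.1 = p.1 := by simpa using hqk
        rwa [this] at hdep
  have hco : (remKeys (fun it => pvGet? rule it.1 == some "no") pvMaster).contains p.1
      = (pvDoomed rule).contains p.1 := by
    cases hh : (pvDoomed rule).contains p.1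
    · have h2 : p.1 ∉ remKeys (fun it => pvGet? rule it.1 == some "no") pvMaster :=
        fun hx => (by simpa using hh : p.1 ∉ pvDoomed rule) (hmem.mp hx)
      simp [h2]
    · simp [hmem.mpr (by simpa using hh)]
  exact congrArg Bool.not hco
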